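-- pv_equiv track=rewrite | github.com/llenice/self_learn | cs61a/lab/lab05/lab05.py | backAndForth
-- ===== SOURCE A (Python) =====
-- def backAndForth(t):
--     """Yields and skips elements from iterator t, back and forth.
--
--     >>> list(backAndForth(iter([1, 2, 3, 4, 5, 6, 7, 8, 9])))
--     [1, 4, 5, 6]
--     >>> list(backAndForth(iter([1, 2, 2])))
--     [1]
--     >>> # generators allow us to represent infinite sequences!!!
--     >>> def naturals():
--     ...     i = 0
--     ...     while True:
--     ...         yield i
--     ...         i += 1
--     >>> m = backAndForth(naturals())
--     >>> [next(m) for _ in range(9)]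
--     [0, 3, 4, 5, 10, 11, 12, 13, 14]
--     """
--     "*** YOUR CODE HERE ***"
--     # 思路:
--     # 1. 现在是第几轮：round
--     # 2. 现在是第round轮的第几个：i
--     # 3. round是偶数 => 跳过
--     # 4. round是奇数 => yield
--     i,round=0,1
--     for x in t:
--         i+=1
--         if round%2 ==1:
--             yield x
--         if i == round :
--             i=0
--             round+=1
-- ===== SOURCE B (Python) =====
-- def backAndForth(t):
--     """Round-structured rewrite: consume the iterator in rounds of sizes
--     1,2,3,...; yield a whole round exactly when its number is odd."""
--     it = iter(t)
--     r = 1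
--     while True:
--         chunk = []
--         for _ in range(r):
--             try:
--                 chunk.append(next(it))
--             except StopIteration:
--                 if r % 2 == 1:
--                     yield from chunk
--                 return
--         if r % 2 == 1:
--             yield from chunk
--         r += 1
-- ===== Notes on version B (the rewrite author's own statement) =====
-- stated objective: alternative
-- what changed: Replaced A's flat single pass with per-element i/round counters by an explicit nested round loop that consumes a chunk of `round` elements per iteration and yields the whole chunk exactly when the round number is odd.
import Mathlib
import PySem

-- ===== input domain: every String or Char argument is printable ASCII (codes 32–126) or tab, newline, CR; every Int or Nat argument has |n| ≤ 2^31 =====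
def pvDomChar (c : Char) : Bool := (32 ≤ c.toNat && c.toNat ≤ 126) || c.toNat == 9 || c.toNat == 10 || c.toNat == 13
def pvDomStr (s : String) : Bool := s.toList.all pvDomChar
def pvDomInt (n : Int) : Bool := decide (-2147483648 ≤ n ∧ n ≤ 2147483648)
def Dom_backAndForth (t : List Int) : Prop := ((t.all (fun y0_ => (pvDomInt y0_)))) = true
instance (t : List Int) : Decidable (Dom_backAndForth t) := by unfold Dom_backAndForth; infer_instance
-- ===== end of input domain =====

-- B replaces A's flat single pass with per-element counters by an explicit
-- nested round loop (consume a chunk of `round` elements, emit it iff the round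
-- number is odd); objective: alternative decomposition, same O(n) cost.
-- The equivalence is about the returned element sequence (the list of yielded
-- values); both Pythons are generators consuming the iterator argument.

-- ===== PORT A =====
-- state (i, round, acc): i and round as Python ints, acc the yielded elements
def pvStepA (s : Int × Int × List Int) (x : Int) : Int × Int × List Int :=
  let i := s.1 + 1
  let acc := if s.2.1 % 2 == 1 then s.2.2 ++ [x] else s.2.2
  if i == s.2.1 then (0, s.2.1 + 1, acc) else (i, s.2.1, acc)

def backAndForth (t : List Int) : List Int :=
  (t.foldl pvStepA (0, 1, [])).2.2

-- ===== PORT B =====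
-- bfGo k t: rounds counted by k (current round number = k+1, always ≥ 1);
-- the inner `for _ in range(r)` loop collecting `chunk` is the `take`, the
-- StopIteration return is the length-< branch.
def bfGo (k : Nat) (t : List Int) : List Int :=
  if t.length < k + 1 then
    (if (k + 1) % 2 = 1 then t else [])
  else
    (if (k + 1) % 2 = 1 then t.take (k + 1) else []) ++ bfGo (k + 1) (t.drop (k + 1))
termination_by t.length
decreasing_by simp_all; omega

def backAndForth_alt (t : List Int) : List Int := bfGo 0 t

-- ===== PRECONDITION & SPEC =====
def Spec_backAndForth (t : List Int) (out : List Int) : Prop := out = backAndForth_alt t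
instance (t : List Int) (out : List Int) : Decidable (Spec_backAndForth t out) := by unfold Spec_backAndForth; infer_instance

-- ===== CLAIM (what is proved, stated in full; the proofs are below) =====
def Claim_equal_backAndForth : Prop := ∀ (t : List Int), Dom_backAndForth t → Spec_backAndForth t (backAndForth t)

-- ===== LEMMAS AND PROOFS =====

-- bfRun m r t: the elements A yields from t when m elements remain in round r
def bfRun : Nat → Nat → List Int → List Int
  | _, _, [] => []
  | m, r, x :: rest =>
    (if r % 2 = 1 then [x] else []) ++
      (if m = 1 then bfRun (r + 1) (r + 1) rest else bfRun (m - 1) r rest)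

theorem pv_emit_cast (r : Nat) : (((r : Int)) % 2 == 1) = decide (r % 2 = 1) := by
  rw [Bool.eq_iff_iff]
  simp only [beq_iff_eq, decide_eq_true_eq]
  omega

theorem pv_fold_eq (t : List Int) : ∀ (m r : Nat) (acc : List Int), 1 ≤ m → m ≤ r →
    (List.foldl pvStepA ((r : Int) - (m : Int), (r : Int), acc) t).2.2 = acc ++ bfRun m r t := by
  induction t with
  | nil => intro m r acc _ _; simp [bfRun]
  | cons x rest ih =>
    intro m r acc hm hmr
    simp only [List.foldl, pvStepA, pv_emit_cast]
    by_cases h1 : m = 1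
    · subst h1
      have hc : ((r : Int) - ((1 : Nat) : Int) + 1 == (r : Int)) = true := by
        push_cast; simp
      rw [hc, if_pos rfl]
      have h0 : (0 : Int) = ((r + 1 : Nat) : Int) - ((r + 1 : Nat) : Int) := by push_cast; ring
      have h2 : (r : Int) + 1 = ((r + 1 : Nat) : Int) := by push_cast; ring
      rw [h0, h2, ih (r + 1) (r + 1) _ (by omega) (le_refl _)]
      by_cases hp : r % 2 = 1 <;> simp [bfRun, hp, List.append_assoc]
    · have hc : ((r : Int) - (m : Int) + 1 == (r : Int)) = false := by
        simp only [beq_eq_false_iff_ne, ne_eq]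
        omega
      rw [hc]
      simp only [Bool.false_eq_true, if_false]
      have h2 : (r : Int) - (m : Int) + 1 = (r : Int) - ((m - 1 : Nat) : Int) := by omega
      rw [h2, ih (m - 1) r _ (by omega) (by omega)]
      by_cases hp : r % 2 = 1 <;> simp [bfRun, hp, h1, List.append_assoc]

theorem pv_chunk (t : List Int) : ∀ (m r : Nat), 1 ≤ m →
    bfRun m r t = (if r % 2 = 1 then t.take m else []) ++ bfRun (r + 1) (r + 1) (t.drop m) := by
  induction t with
  | nil => intro m r _; by_cases hp : r % 2 = 1 <;> simp [bfRun, hp]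
  | cons x rest ih =>
    intro m r hm
    by_cases h1 : m = 1
    · subst h1
      by_cases hp : r % 2 = 1 <;> simp [bfRun, hp]
    · have hdrop : (x :: rest).drop m = rest.drop (m - 1) := by
        cases m with
        | zero => omega
        | succ n => simp
      have htake : (x :: rest).take m = x :: rest.take (m - 1) := by
        cases m with
        | zero => omega
        | succ n => simp
      rw [hdrop, htake]
      by_cases hp : r % 2 = 1 <;>
        simp [bfRun, hp, h1, ih (m - 1) r (by omega)]

theorem pv_go_eq_aux : ∀ (n : Nat) (t : List Int), t.length ≤ n →
    ∀ (k : Nat), bfGo k t = bfRun (k + 1) (k + 1) t := by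
  intro n
  induction n with
  | zero =>
    intro t ht k
    have ht0 : t = [] := by
      cases t with
      | nil => rfl
      | cons a l => simp at ht
    subst ht0
    rw [bfGo]
    simp [bfRun]
  | succ n ihn =>
    intro t ht k
    rw [bfGo, pv_chunk t (k + 1) (k + 1) (by omega)]
    by_cases h : t.length < k + 1
    · have hdrop : t.drop (k + 1) = [] := by
        apply List.drop_eq_nil_of_le; omega
      rw [List.take_of_length_le (by omega : t.length ≤ k + 1)]
      simp [h, hdrop, bfRun]
    · have hlt : (t.drop (k + 1)).length < t.length := by
        simp; omega
      simp only [h, if_false]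
      rw [ihn (t.drop (k + 1)) (by simp; omega) (k + 1)]

theorem pv_go_eq (t : List Int) (k : Nat) : bfGo k t = bfRun (k + 1) (k + 1) t :=
  pv_go_eq_aux t.length t (le_refl _) k

-- ===== VERDICT (by name: the statement is the Claim_ definition above) =====
theorem backAndForth_spec : Claim_equal_backAndForth := by
  intro t _
  show backAndForth t = backAndForth_alt t
  unfold backAndForth backAndForth_alt
  have h := pv_fold_eq t 1 1 [] (le_refl 1) (le_refl 1)
  simpa using h.trans (by rw [pv_go_eq t 0]; simp)
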